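-- pv_equiv track=rewrite | github.com/Bartloc/daily-coding-problem-python | solution-221.py | find_nth_number
-- ===== SOURCE A (Python) =====
-- def find_nth_number(i,num=7):
--     if not isinstance(i,int) or i<0:
--         raise Exception('i ={}: shall be int and >=0'.format(i))
--     nth=0
--     if i==0:
--         nth=1
--     elif i==1:
--         nth=num
--     elif i%2==1:
--         nth=pow(num,i//2+1)
--     elif i%2==0:
--         for j in range(i//2+1):
--             nth +=pow(num,j)
--     else:
--          raise Exception('for input {}: Unexpected error'.format(i))
--     return nth
-- ===== SOURCE B (Python) =====
-- def find_nth_number(i, num=7):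
--     k = i // 2
--     if i % 2 == 1:
--         return num ** (k + 1)
--     if num == 1:
--         return k + 1
--     return (num ** (k + 1) - 1) // (num - 1)
-- ===== Notes on version B (the rewrite author's own statement) =====
-- stated objective: alternative
-- what changed: The even-index O(i)-term loop summing powers of num is replaced by the geometric-series closed form (num^(i//2+1)-1)//(num-1) with a num==1 special case; at the probed sizes the giant result integer dominates the cost, so no speed is claimed.
import Mathlib
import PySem

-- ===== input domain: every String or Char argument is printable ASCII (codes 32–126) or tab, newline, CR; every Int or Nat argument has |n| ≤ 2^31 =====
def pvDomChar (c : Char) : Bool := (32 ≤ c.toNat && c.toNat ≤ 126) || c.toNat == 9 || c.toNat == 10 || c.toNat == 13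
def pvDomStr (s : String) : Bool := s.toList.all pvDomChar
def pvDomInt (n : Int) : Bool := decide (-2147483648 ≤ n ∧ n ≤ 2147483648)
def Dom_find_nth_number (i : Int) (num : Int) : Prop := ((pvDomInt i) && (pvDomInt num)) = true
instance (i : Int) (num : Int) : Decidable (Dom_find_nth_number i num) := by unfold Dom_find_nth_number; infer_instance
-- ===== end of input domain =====

-- B replaces the even-case loop summing num^j by the geometric-series closed form (alternative algorithm; no speed claimed).

-- ===== PORT A =====
def find_nth_number (i : Int) (num : Int) : Int :=
  if i < 0 then 0  -- Python A raises Exception here; excluded by Pre_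
  else if i = 0 then 1
  else if i = 1 then num
  else if PySem.Int.mod i 2 = 1 then num ^ (PySem.Int.floordiv i 2 + 1).toNat
  else (PySem.List.pyRange 0 (PySem.Int.floordiv i 2 + 1) 1).foldl
         (fun nth j => nth + num ^ j.toNat) 0

-- ===== PORT B =====
def find_nth_number_alt (i : Int) (num : Int) : Int :=
  let k := PySem.Int.floordiv i 2
  if PySem.Int.mod i 2 = 1 then num ^ (k + 1).toNat
  else if num = 1 then k + 1
  else PySem.Int.floordiv (num ^ (k + 1).toNat - 1) (num - 1)

-- ===== PRECONDITION & SPEC =====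
-- Pre_ excludes exactly i < 0, where Python A raises Exception.
def Pre_find_nth_number (i : Int) (num : Int) : Prop := 0 ≤ i
instance (i : Int) (num : Int) : Decidable (Pre_find_nth_number i num) := by unfold Pre_find_nth_number; infer_instance
def pvWitness_find_nth_number : Int × Int := (4, 7)

def Spec_find_nth_number (i : Int) (num : Int) (out : Int) : Prop := out = find_nth_number_alt i num
instance (i : Int) (num : Int) (out : Int) : Decidable (Spec_find_nth_number i num out) := by unfold Spec_find_nth_number; infer_instance

-- ===== CLAIM (what is proved, stated in full; the proofs are below) =====
def Claim_equal_find_nth_number : Prop := ∀ (i : Int) (num : Int), Dom_find_nth_number i num → Pre_find_nth_number i num → Spec_find_nth_number i num (find_nth_number i num)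

-- ===== LEMMAS AND PROOFS =====

-- The loop of A computes the geometric sum.
lemma foldl_pow_sum (num : Int) (n : Nat) :
    ∀ init : Int, (PySem.List.pyRange 0 (n : Int) 1).foldl (fun nth j => nth + num ^ j.toNat) init
      = init + ∑ j ∈ Finset.range n, num ^ j := by
  induction n with
  | zero => intro init; simp [PySem.List.pyRange_one_eq_nil (by omega : (0:Int) ≤ 0)]
  | succ n ih =>
    intro init
    have h : PySem.List.pyRange 0 ((n + 1 : Nat) : Int) 1
        = PySem.List.pyRange 0 (n : Int) 1 ++ [(n : Int)] := by
      have := PySem.List.pyRange_one_succ_right (a := 0) (b := (n : Int)) (by positivity)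
      push_cast
      push_cast at this
      exact this
    rw [h, List.foldl_append, ih, Finset.sum_range_succ]
    simp [add_assoc]

-- B's even-case expression equals the geometric sum.
lemma alt_even_eq_sum (num : Int) (k : Int) (hk : 0 ≤ k) :
    (if num = 1 then k + 1 else PySem.Int.floordiv (num ^ (k + 1).toNat - 1) (num - 1))
      = ∑ j ∈ Finset.range (k + 1).toNat, num ^ j := by
  by_cases h1 : num = 1
  · simp [h1]
    omega
  · simp only [if_neg h1]
    have hmul : (∑ j ∈ Finset.range (k + 1).toNat, num ^ j) * (num - 1)
        = num ^ (k + 1).toNat - 1 := geom_sum_mul num ((k + 1).toNat)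
    rw [← hmul, PySem.Int.floordiv]
    exact Int.mul_fdiv_cancel _ (by omega)

theorem find_nth_number_equal (i num : Int) (hpre : 0 ≤ i) :
    find_nth_number i num = find_nth_number_alt i num := by
  unfold find_nth_number find_nth_number_alt
  have hnl : ¬ i < 0 := by omega
  have hk : 0 ≤ PySem.Int.floordiv i 2 := by
    rw [PySem.Int.floordiv_eq_ediv_of_pos (by omega)]; omega
  by_cases h0 : i = 0
  · subst h0
    have h := alt_even_eq_sum num 0 le_rfl
    norm_num at h
    norm_num [show PySem.Int.mod (0 : Int) 2 = 0 from by decide,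
      show PySem.Int.floordiv (0 : Int) 2 = 0 from by decide, h]
    exact fun hn => (h hn).symm
  · by_cases h1 : i = 1
    · subst h1
      norm_num [show PySem.Int.mod (1 : Int) 2 = 1 from by decide,
        show PySem.Int.floordiv (1 : Int) 2 = 0 from by decide]
    · by_cases hodd : PySem.Int.mod i 2 = 1
      · rw [if_neg hnl, if_neg h0, if_neg h1, if_pos hodd, if_pos hodd]
      · rw [if_neg hnl, if_neg h0, if_neg h1, if_neg hodd, if_neg hodd,
          alt_even_eq_sum num _ hk]
        have hcast : PySem.Int.floordiv i 2 + 1 = ((PySem.Int.floordiv i 2 + 1).toNat : Int) := by omega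
        rw [hcast, foldl_pow_sum]
        simp only [zero_add, Int.toNat_natCast]

-- ===== VERDICT (by name: the statement is the Claim_ definition above) =====
theorem find_nth_number_spec : Claim_equal_find_nth_number := by
  intro i num _ hpre
  unfold Spec_find_nth_number
  exact find_nth_number_equal i num hpre
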